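-- pv_equiv track=rewrite | github.com/GordonBreazz/CODEWARS | Python/5kyu--Square-sums-(simple).py | search
-- ===== SOURCE A (Python) =====
-- def search(cur, numset, result):
--     if len(numset) == 1:
--         return result
--     square = [49, 36, 25, 16, 9, 4]
--     numset.remove(cur)
--     for i in square:
--         p = i - cur
--         if p < 0: continue
--         if p in numset:
--             arr = search(p, numset.copy(), [*result, p])
--             if arr: return arr
--     return []
-- ===== SOURCE B (Python) =====
-- def search(cur, numset, result):
--     # Explicit-stack DFS instead of recursion; same return values, and like A
--     # it removes cur from the caller's numset (the first frame holds it).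
--     square = [49, 36, 25, 16, 9, 4]
--     stack = [(cur, numset, result)]
--     while stack:
--         c, s, r = stack.pop()
--         if len(s) == 1:
--             return r
--         s.remove(c)
--         succ = []
--         for i in square:
--             p = i - c
--             if p >= 0 and p in s:
--                 succ.append((p, s.copy(), [*r, p]))
--         stack.extend(reversed(succ))
--     return []
-- ===== Notes on version B (the rewrite author's own statement) =====
-- stated objective: alternative
-- what changed: The recursive backtracking with early return is rewritten as an explicit-stack depth-first search: frames (cur, set, result) are pushed in reversed square order and the loop returns the first frame whose set has one element.
import Mathlib
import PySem

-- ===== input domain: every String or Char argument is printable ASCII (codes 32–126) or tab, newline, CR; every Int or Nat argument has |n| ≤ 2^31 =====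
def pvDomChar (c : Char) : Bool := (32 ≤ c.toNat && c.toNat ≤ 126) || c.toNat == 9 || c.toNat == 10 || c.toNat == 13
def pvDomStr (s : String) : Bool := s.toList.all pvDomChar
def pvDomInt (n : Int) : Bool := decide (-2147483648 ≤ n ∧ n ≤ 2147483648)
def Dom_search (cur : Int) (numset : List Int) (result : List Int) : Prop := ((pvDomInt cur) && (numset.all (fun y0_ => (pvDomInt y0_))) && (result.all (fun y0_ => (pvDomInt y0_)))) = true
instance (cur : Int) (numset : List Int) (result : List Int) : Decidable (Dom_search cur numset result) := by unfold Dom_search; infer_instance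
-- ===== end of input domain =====

-- B replaces the recursion by an explicit-stack DFS (alternative decomposition, same cost).
-- Both programs mutate the passed numset in place (remove(cur)); the theorems are about the return value.

-- termination helper for both ports: a successful remove? shortens the list
theorem pv_remove_len {l l' : List Int} {v : Int} (h : PySem.List.remove? l v = some l') :
    l'.length < l.length := by
  have hv : v ∈ l := by
    by_contra hv
    rw [(PySem.List.remove?_eq_none_iff l v).mpr hv] at h
    simp at h
  rw [PySem.List.remove?_eq_some_erase l v hv] at h
  cases h
  have h1 : (l.erase v).length = l.length - 1 := List.length_erase_of_mem hv
  have h2 : 0 < l.length := List.length_pos_of_mem hv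
  omega

-- ===== PORT A =====
-- literal transliteration of A's recursive backtracking; the for-loop over
-- square is the helper searchTry (continue = skip to the rest of the list).
mutual
def search (cur : Int) (numset : List Int) (result : List Int) : List Int :=
  if numset.length == 1 then result
  else
    match h : PySem.List.remove? numset cur with
    | none => []          -- Python: numset.remove(cur) raises ValueError (excluded by Pre_search)
    | some ns => searchTry cur ns result [49, 36, 25, 16, 9, 4]
termination_by 7 * numset.length
decreasing_by have := pv_remove_len h; simp only [List.length_cons, List.length_nil]; omega

def searchTry (cur : Int) (ns : List Int) (result : List Int) (square : List Int) : List Int :=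
  match square with
  | [] => []
  | i :: rest =>
    let p := i - cur
    if p < 0 then searchTry cur ns result rest
    else if ns.contains p then
      let arr := search p ns (result ++ [p])   -- numset.copy() is ns itself (immutable lists)
      if arr ≠ [] then arr else searchTry cur ns result rest
    else searchTry cur ns result rest
termination_by 7 * ns.length + square.length
decreasing_by all_goals (simp only [List.length_cons]; omega)
end

-- ===== PORT B =====
-- the Python stack's top (list end, .pop()) is the HEAD of the Lean list, so
-- stack.extend(reversed(succ)) followed by pops is succ ++ rest here.
def altSucc (c : Int) (ns : List Int) (r : List Int) : List (Int × List Int × List Int) :=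
  [49, 36, 25, 16, 9, 4].filterMap fun i =>
    let p := i - c
    if 0 ≤ p ∧ ns.contains p then some (p, ns, r ++ [p]) else none

theorem pv_altSucc_sum (c : Int) (ns r : List Int) :
    ((altSucc c ns r).map (fun f => 7 ^ f.2.1.length)).sum ≤ 6 * 7 ^ ns.length := by
  have h : ∀ f ∈ altSucc c ns r, f.2.1 = ns := by
    intro f hf
    simp only [altSucc, List.mem_filterMap] at hf
    obtain ⟨i, _, hi⟩ := hf
    simp at hi
    obtain ⟨-, hf⟩ := hi
    rw [← hf]
  have hlen : (altSucc c ns r).length ≤ 6 := by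
    have := List.length_filterMap_le (l := [(49:Int), 36, 25, 16, 9, 4])
      (f := fun i => let p := i - c; if 0 ≤ p ∧ ns.contains p then some (p, ns, r ++ [p]) else none)
    simpa [altSucc] using this
  calc ((altSucc c ns r).map (fun f => 7 ^ f.2.1.length)).sum
      = ((altSucc c ns r).map (fun _ => 7 ^ ns.length)).sum := by
        apply congrArg; exact List.map_congr_left (fun f hf => by rw [h f hf])
    _ = (altSucc c ns r).length * 7 ^ ns.length := by
        rw [List.map_const', List.sum_replicate, smul_eq_mul]
    _ ≤ 6 * 7 ^ ns.length := Nat.mul_le_mul_right _ hlen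

def altLoop (stack : List (Int × List Int × List Int)) : List Int :=
  match stack with
  | [] => []
  | (c, s, r) :: rest =>
    if s.length == 1 then r
    else
      match h : PySem.List.remove? s c with
      | none => []        -- Python: s.remove(c) raises ValueError (excluded by Pre_search)
      | some ns => altLoop (altSucc c ns r ++ rest)
termination_by (stack.map (fun f => 7 ^ f.2.1.length)).sum
decreasing_by
  have h1 := pv_altSucc_sum c ns r
  have h2 : ns.length < s.length := pv_remove_len h
  have h3 : 7 ^ s.length ≥ 7 * 7 ^ ns.length := by
    have he : 7 * 7 ^ ns.length = 7 ^ (ns.length + 1) := by ring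
    rw [he]
    exact Nat.pow_le_pow_right (by omega) (by omega)
  have h4 : 0 < 7 ^ ns.length := Nat.pow_pos (by norm_num)
  simp only [List.map_append, List.sum_append, List.map_cons, List.sum_cons]
  omega

def search_alt (cur : Int) (numset : List Int) (result : List Int) : List Int :=
  altLoop [(cur, numset, result)]

-- ===== PRECONDITION & SPEC =====
-- Pre_ excludes exactly the inputs where both Pythons raise ValueError:
-- numset of length ≠ 1 that does not contain cur (list.remove fails).
def Pre_search (cur : Int) (numset : List Int) (result : List Int) : Prop :=
  numset.length = 1 ∨ cur ∈ numset
instance (cur : Int) (numset : List Int) (result : List Int) : Decidable (Pre_search cur numset result) := by unfold Pre_search; infer_instance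

def pvWitness_search : Int × List Int × List Int := (3, [3, 6, 10, 15, 1], [3])

def Spec_search (cur : Int) (numset : List Int) (result : List Int) (out : List Int) : Prop := out = search_alt cur numset result
instance (cur : Int) (numset : List Int) (result : List Int) (out : List Int) : Decidable (Spec_search cur numset result out) := by unfold Spec_search; infer_instance

-- ===== CLAIM (what is proved, stated in full; the proofs are below) =====
def Claim_equal_search : Prop := ∀ (cur : Int) (numset : List Int) (result : List Int), Dom_search cur numset result → Pre_search cur numset result → Spec_search cur numset result (search cur numset result)

-- ===== LEMMAS AND PROOFS =====

-- "run the recursive search on each frame, return the first nonempty answer"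
def firstRun : List (Int × List Int × List Int) → List Int
  | [] => []
  | (c, s, r) :: rest => if search c s r = [] then firstRun rest else search c s r

theorem firstRun_append (a b : List (Int × List Int × List Int)) :
    firstRun (a ++ b) = if firstRun a = [] then firstRun b else firstRun a := by
  induction a with
  | nil => simp [firstRun]
  | cons f rest ih =>
    obtain ⟨c, s, r⟩ := f
    simp only [List.cons_append, firstRun, ih]
    by_cases h : search c s r = [] <;> simp [h]

-- A's for-loop equals "first nonempty run among B's successor frames"
theorem searchTry_eq_firstRun (c : Int) (ns r : List Int) (sq : List Int) :
    searchTry c ns r sq = firstRun (sq.filterMap fun i =>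
      let p := i - c; if 0 ≤ p ∧ ns.contains p then some (p, ns, r ++ [p]) else none) := by
  induction sq with
  | nil => simp [searchTry, firstRun]
  | cons i rest ih =>
    simp only [List.filterMap_cons]
    by_cases hc : 0 ≤ i - c ∧ ns.contains (i - c)
    · have hneg : ¬ (i - c < 0) := by omega
      simp only [hc, if_pos, searchTry, hneg, if_neg, not_false_iff]
      by_cases ha : search (i - c) ns (r ++ [i - c]) = [] <;> simp [firstRun, ha, ih]
    · simp only [hc, if_neg, not_false_iff, searchTry]
      rcases not_and_or.mp hc with h0 | h1
      · have : i - c < 0 := by omega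
        simp [this, ih]
      · have hm : i - c ∉ ns := by simpa using h1
        by_cases hneg : i - c < 0
        · simp [hneg, ih]
        · simp [hneg, hm, ih]

-- frames produced by altSucc satisfy the loop invariant
theorem altSucc_inv (c : Int) (ns r : List Int) :
    ∀ f ∈ altSucc c ns r, f.1 ∈ f.2.1 ∧ f.2.2 ≠ [] := by
  intro f hf
  simp only [altSucc, List.mem_filterMap] at hf
  obtain ⟨i, _, hi⟩ := hf
  simp at hi
  obtain ⟨⟨-, hmem⟩, hf⟩ := hi
  rw [← hf]
  exact ⟨hmem, by simp⟩

-- main loop lemma: on stacks whose frames all have c ∈ s and r ≠ [],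
-- the explicit-stack DFS returns the first nonempty recursive answer.
theorem altLoop_eq_firstRun (stack : List (Int × List Int × List Int))
    (hinv : ∀ f ∈ stack, f.1 ∈ f.2.1 ∧ f.2.2 ≠ []) :
    altLoop stack = firstRun stack := by
  induction stack using altLoop.induct with
  | case1 => simp [altLoop, firstRun]
  | case2 c s r rest hlen =>
    have hr : r ≠ [] := (hinv (c, s, r) (by simp)).2
    have hs : search c s r = r := by rw [search]; simp [hlen]
    rw [altLoop]
    simp only [hlen, if_pos, firstRun, hs]
    simp [hr]
  | case3 c s r rest hlen hnone =>
    exact absurd ((PySem.List.remove?_eq_none_iff _ _).mp hnone) (not_not.mpr (hinv (c, s, r) (by simp)).1)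
  | case4 c s r rest hlen ns hsome ih =>
    have hinv' : ∀ f ∈ altSucc c ns r ++ rest, f.1 ∈ f.2.1 ∧ f.2.2 ≠ [] := by
      intro f hf
      rcases List.mem_append.mp hf with h | h
      · exact altSucc_inv c ns r f h
      · exact hinv f (List.mem_cons_of_mem _ h)
    have hA : search c s r = firstRun (altSucc c ns r) := by
      rw [search, if_neg hlen]
      split
      · next heq => rw [heq] at hsome; simp at hsome
      · next ns2 heq =>
        rw [heq] at hsome
        cases hsome
        exact searchTry_eq_firstRun c ns r _
    rw [altLoop, if_neg hlen]
    split
    · next heq => rw [heq] at hsome; simp at hsome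
    · next ns2 heq =>
      rw [heq] at hsome
      cases hsome
      rw [ih hinv', firstRun_append, firstRun, hA]

-- ===== VERDICT (by name: the statement is the Claim_ definition above) =====
theorem search_spec : Claim_equal_search := by
  intro cur numset result _ hpre
  unfold Spec_search search_alt
  by_cases hlen : numset.length == 1
  · rw [altLoop, search]; simp [hlen]
  · rcases hpre with h1 | hmem
    · exact absurd (by simpa using h1) (by simpa using hlen)
    · have hmem' : ¬ PySem.List.remove? numset cur = none := fun h =>
        absurd ((PySem.List.remove?_eq_none_iff _ _).mp h) (not_not.mpr hmem)
      rw [altLoop, search, if_neg hlen, if_neg hlen]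
      split
      · next heq => exact absurd heq hmem'
      · next ns heq =>
        rw [List.append_nil,
          altLoop_eq_firstRun _ (fun f hf => altSucc_inv cur ns result f hf),
          searchTry_eq_firstRun]
        rfl
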